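-- pv_equiv track=rewrite | github.com/mils8545/aoc2015python | 18/main.py | part2
-- ===== SOURCE A (Python) =====
-- def parseLines(lines):
--     grid = []
--     for line in lines:
--         gridLine = []
--         for char in line:
--             gridLine.append(True if char == "#" else False)
--         grid.append(gridLine)
--     return grid
--
-- def stepGrid(grid):
--     newGrid = []
--     for i in range(len(grid)):
--         newGridLine = []
--         for j in range(len(grid[i])):
--             neighbourCount = 0
--             for k in range(-1,2):
--                 for l in range(-1,2):
--                     if (k!=0 or l!=0) and i + k >= 0 and j + l >= 0 and i+k < len(grid) and j + l < len(grid[i]) and grid[i+k][j+l]: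
--                         neighbourCount += 1
--             if grid[i][j]:
--                 newGridLine.append(True if neighbourCount >= 2 and neighbourCount <= 3 else False)
--             else:
--                 newGridLine.append(True if neighbourCount == 3 else False)
--         newGrid.append(newGridLine)
--     return newGrid
--
-- def lightCount(grid):
--     count = 0
--     for i in range(len(grid)):
--         for j in range(len(grid[i])):
--             if grid[i][j]:
--                 count += 1
--     return count
--
-- def part2(lines):
--     grid = parseLines(lines)
--     STEPS = 100
--     for i in range(STEPS):
--         grid = stepGrid(grid)
--         grid[0][0] = True
--         grid[0][len(grid[0])-1] = True
--         grid[len(grid)-1][0] = True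
--         grid[len(grid)-1][len(grid[0])-1] = True
--     lights = lightCount(grid)
--     return(f"The number of lights lit after {STEPS} steps is {lights}.")
-- ===== SOURCE B (Python) =====
-- def part2(lines):
--     rows = len(lines)
--     (cols,) = {len(line) for line in lines}
--     live = {(i, j) for i, line in enumerate(lines)
--                    for j, ch in enumerate(line) if ch == "#"}
--     corners = {(0, 0), (0, cols - 1), (rows - 1, 0), (rows - 1, cols - 1)}
--     for _ in range(100):
--         counts = {}
--         for (i, j) in live:
--             for di in (-1, 0, 1):
--                 for dj in (-1, 0, 1):
--                     if (di, dj) != (0, 0) and 0 <= i + di < rows and 0 <= j + dj < cols: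
--                         key = (i + di, j + dj)
--                         counts[key] = counts.get(key, 0) + 1
--         live = {c for c, n in counts.items()
--                 if n == 3 or (n == 2 and c in live)} | corners
--     return f"The number of lights lit after 100 steps is {len(live)}."
-- ===== Notes on version B (the rewrite author's own statement) =====
-- stated objective: faster
-- what changed: A re-simulates the automaton on a dense list-of-lists boolean grid, scanning all R*C cells and their 3x3 windows every step; B keeps a set of live coordinates, each step builds a neighbour-count dictionary from the live cells only, takes cells with count 3 (or 2 and alive) plus the four corners as the next set, and returns the size of the final set.
import Mathlib
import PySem

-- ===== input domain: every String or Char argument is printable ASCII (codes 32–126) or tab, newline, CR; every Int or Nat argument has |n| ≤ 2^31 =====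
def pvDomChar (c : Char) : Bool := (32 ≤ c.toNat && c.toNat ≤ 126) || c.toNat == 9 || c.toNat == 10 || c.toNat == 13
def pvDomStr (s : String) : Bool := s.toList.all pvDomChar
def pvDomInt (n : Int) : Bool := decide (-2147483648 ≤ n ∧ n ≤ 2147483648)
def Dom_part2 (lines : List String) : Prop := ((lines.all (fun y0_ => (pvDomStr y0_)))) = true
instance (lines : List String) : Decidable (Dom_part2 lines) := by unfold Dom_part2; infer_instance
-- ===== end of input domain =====

-- B replaces A's dense grid-of-booleans sweep by a sparse set of live coordinates with a
-- neighbour-count dictionary per step (objective: faster — per-step work scales with the live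
-- cells instead of the whole R*C board). Neither implementation mutates its argument.

-- ===== PORT A =====
def pvParseLines (lines : List String) : List (List Bool) :=
  lines.foldl (fun grid line =>
    grid ++ [line.toList.foldl (fun gl ch => gl ++ [ch == '#']) []]) []

def pvNbr (grid : List (List Bool)) (i j : Int) : Int :=
  (PySem.List.pyRange (-1) 2 1).foldl (fun c k =>
    (PySem.List.pyRange (-1) 2 1).foldl (fun c l =>
      if (k ≠ 0 ∨ l ≠ 0) ∧ 0 ≤ i + k ∧ 0 ≤ j + l ∧ i + k < (grid.length : Int)
          ∧ j + l < ((PySem.List.pyGetD grid i []).length : Int)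
          ∧ PySem.List.pyGetD (PySem.List.pyGetD grid (i + k) []) (j + l) false = true
      then c + 1 else c) c) 0

def pvStepGrid (grid : List (List Bool)) : List (List Bool) :=
  (PySem.List.pyRange 0 (grid.length : Int) 1).foldl (fun ng i =>
    ng ++ [(PySem.List.pyRange 0 ((PySem.List.pyGetD grid i []).length : Int) 1).foldl (fun nl j =>
      nl ++ [if PySem.List.pyGetD (PySem.List.pyGetD grid i []) j false
             then decide (2 ≤ pvNbr grid i j ∧ pvNbr grid i j ≤ 3)
             else decide (pvNbr grid i j = 3)]) []]) []

def pvLightCount (grid : List (List Bool)) : Int :=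
  (PySem.List.pyRange 0 (grid.length : Int) 1).foldl (fun c i =>
    (PySem.List.pyRange 0 ((PySem.List.pyGetD grid i []).length : Int) 1).foldl (fun c j =>
      if PySem.List.pyGetD (PySem.List.pyGetD grid i []) j false then c + 1 else c) c) 0

-- grid[a][b] = True  (indices in range under Pre_, where Python's assignment succeeds)
def pvSetCell (grid : List (List Bool)) (a b : Nat) : List (List Bool) :=
  grid.set a ((grid.getD a []).set b true)

-- the body of A's `for i in range(STEPS)` loop: step, then force the four corners in order
def pvIterA (g : List (List Bool)) : List (List Bool) :=
  let g1 := pvStepGrid g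
  let g2 := pvSetCell g1 0 0
  let g3 := pvSetCell g2 0 ((PySem.List.pyGetD g2 0 []).length - 1)
  let g4 := pvSetCell g3 (g3.length - 1) 0
  pvSetCell g4 (g4.length - 1) ((PySem.List.pyGetD g4 0 []).length - 1)

def part2 (lines : List String) : String :=
  let grid := (List.range 100).foldl (fun g _ => pvIterA g) (pvParseLines lines)
  "The number of lights lit after 100 steps is " ++ PySem.Int.toStr (pvLightCount grid) ++ "."

-- ===== PORT B =====
def pvOffs : List (Int × Int) := [(-1,-1),(-1,0),(-1,1),(0,-1),(0,1),(1,-1),(1,0),(1,1)]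

-- the in-bounds neighbours of live cell c (the keys Source B's inner loops append for c)
def pvAltNbrs (rows cols : Int) (c : Int × Int) : List (Int × Int) :=
  pvOffs.foldl (fun acc d =>
    if 0 ≤ c.1 + d.1 ∧ c.1 + d.1 < rows ∧ 0 ≤ c.2 + d.2 ∧ c.2 + d.2 < cols
    then acc ++ [(c.1 + d.1, c.2 + d.2)] else acc) []

def pvAltCorners (rows cols : Int) : PySem.Set (Int × Int) :=
  PySem.Set.ofList [(0, 0), (0, cols - 1), (rows - 1, 0), (rows - 1, cols - 1)]

def pvAltStep (rows cols : Int) (corners : PySem.Set (Int × Int))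
    (live : PySem.Set (Int × Int)) : PySem.Set (Int × Int) :=
  let keys := live.foldl (fun ks c => ks ++ pvAltNbrs rows cols c) []
  let counts := keys.foldl (fun d k => d.insert k (d.getD k 0 + 1))
    (PySem.Dict.empty : PySem.Dict (Int × Int) Int)
  PySem.Set.union
    (PySem.Set.ofList ((counts.items.filter
      (fun p => p.2 == 3 || (p.2 == 2 && PySem.Set.contains live p.1))).map (·.1)))
    corners

def part2_alt (lines : List String) : String :=
  let rows := (lines.length : Int)
  -- (cols,) = {len(line) for line in lines}: the single width; Python raises ValueError
  -- when the set is not a singleton (jagged or empty input), which Pre_ excludes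
  let widths : PySem.Set Int := PySem.Set.ofList (lines.map (fun l => (l.toList.length : Int)))
  let cols : Int := if widths.length = 1 then widths.getD 0 0 else 0
  let live0 : PySem.Set (Int × Int) := PySem.Set.ofList
    ((PySem.List.enumerate lines 0).flatMap (fun p =>
      (((PySem.List.enumerate p.2.toList 0).filter (fun q => q.2 == '#')).map
        (fun q => (p.1, q.1)))))
  let live := (List.range 100).foldl
    (fun lv _ => pvAltStep rows cols (pvAltCorners rows cols) lv) live0
  "The number of lights lit after 100 steps is " ++ PySem.Int.toStr (live.length : Int) ++ "."

-- ===== PRECONDITION & SPEC =====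
-- Pre_ = exactly the rectangular grids of positive width: on the empty list, on width-0 grids and
-- on jagged lines the Python A raises IndexError (at the corner assignments resp. the neighbour
-- indexing), so Pre_ excludes no input on which A returns.
def Pre_part2 (lines : List String) : Prop :=
  lines ≠ [] ∧ 0 < (PySem.List.pyGetD lines 0 "").toList.length ∧
    ∀ s ∈ lines, s.toList.length = (PySem.List.pyGetD lines 0 "").toList.length
instance (lines : List String) : Decidable (Pre_part2 lines) := by unfold Pre_part2; infer_instance

def pvWitness_part2 : List String := ["#.", ".."]

def Spec_part2 (lines : List String) (out : String) : Prop := out = part2_alt lines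
instance (lines : List String) (out : String) : Decidable (Spec_part2 lines out) := by unfold Spec_part2; infer_instance

-- ===== CLAIM (what is proved, stated in full; the proofs are below) =====
def Claim_equal_part2 : Prop := ∀ (lines : List String), Dom_part2 lines → Pre_part2 lines → Spec_part2 lines (part2 lines)

-- ===== LEMMAS AND PROOFS =====

-- g is an R×C grid
def pvRect (R C : Nat) (g : List (List Bool)) : Prop :=
  g.length = R ∧ ∀ r ∈ g, r.length = C

-- cell lookup with Nat coordinates
def pvCell (g : List (List Bool)) (a b : Nat) : Bool := (g.getD a []).getD b false

-- live is exactly the set of true cells of g, without duplicates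
def pvLiveInv (R C : Nat) (g : List (List Bool)) (s : List (Int × Int)) : Prop :=
  s.Nodup ∧ ∀ p : Int × Int,
    p ∈ s ↔ ∃ a b : Nat, a < R ∧ b < C ∧ p = ((a : Int), (b : Int)) ∧ pvCell g a b = true

lemma pvParse_eq (lines : List String) :
    pvParseLines lines = lines.map (fun l => l.toList.map (· == '#')) := by
  unfold pvParseLines
  rw [PySem.List.foldl_append_singleton_eq_map]
  simp only [List.nil_append]
  exact List.map_congr_left fun l _ => by
    rw [PySem.List.foldl_append_singleton_eq_map]; simp

lemma pvGetD_setB (l : List Bool) (b y : Nat) :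
    (l.set b true).getD y false = if y = b ∧ b < l.length then true else l.getD y false := by
  simp only [List.getD_eq_getElem?_getD, List.getElem?_set]
  by_cases h : b = y
  · subst h
    by_cases hb : b < l.length <;> simp [hb]
  · have h' : ¬(y = b ∧ b < l.length) := fun hc => h hc.1.symm
    simp [h, h']
lemma pvGetD_set (g : List (List Bool)) (a x : Nat) (r : List Bool) :
    (g.set a r).getD x [] = if x = a ∧ a < g.length then r else g.getD x [] := by
  simp only [List.getD_eq_getElem?_getD, List.getElem?_set]
  by_cases h : a = x
  · subst h
    by_cases hb : a < g.length <;> simp [hb]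
  · have h' : ¬(x = a ∧ a < g.length) := fun hc => h hc.1.symm
    simp [h, h']


lemma pvMapRangeGetD {α : Type} (l : List α) (d : α) :
    (List.range l.length).map (fun i => l.getD i d) = l := by
  apply List.ext_getElem
  · simp
  · intro i h1 h2
    simp [List.getElem_map, List.getD_eq_getElem?_getD, List.getElem?_eq_getElem h2]

lemma pvStep_shape (g : List (List Bool)) :
    pvStepGrid g = (List.range g.length).map (fun a =>
      (List.range (g.getD a []).length).map (fun b =>
        if pvCell g a b then decide (2 ≤ pvNbr g ↑a ↑b ∧ pvNbr g ↑a ↑b ≤ 3)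
        else decide (pvNbr g ↑a ↑b = 3))) := by
  unfold pvStepGrid
  rw [PySem.List.pyRange_zero_nat, List.foldl_map, PySem.List.foldl_append_singleton_eq_map]
  simp only [List.nil_append]
  refine List.map_congr_left fun a _ => ?_
  rw [PySem.List.pyGetD_natCast, PySem.List.pyRange_zero_nat, List.foldl_map,
    PySem.List.foldl_append_singleton_eq_map]
  simp only [List.nil_append]
  refine List.map_congr_left fun b _ => ?_
  simp only [PySem.List.pyGetD_natCast, pvCell]
  rfl
lemma pvAltNbrs_eq (rows cols : Int) (c : Int × Int) :
    pvAltNbrs rows cols c = (pvOffs.filter (fun d =>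
      decide (0 ≤ c.1 + d.1 ∧ c.1 + d.1 < rows ∧ 0 ≤ c.2 + d.2 ∧ c.2 + d.2 < cols))).map
      (fun d => (c.1 + d.1, c.2 + d.2)) := by
  unfold pvAltNbrs
  have h : (fun (acc : List (Int × Int)) (d : Int × Int) =>
      if 0 ≤ c.1 + d.1 ∧ c.1 + d.1 < rows ∧ 0 ≤ c.2 + d.2 ∧ c.2 + d.2 < cols
      then acc ++ [(c.1 + d.1, c.2 + d.2)] else acc) =
      (fun acc d =>
      if (decide (0 ≤ c.1 + d.1 ∧ c.1 + d.1 < rows ∧ 0 ≤ c.2 + d.2 ∧ c.2 + d.2 < cols)) = true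
      then acc ++ [(c.1 + d.1, c.2 + d.2)] else acc) := by
    funext acc d; simp
  rw [h, PySem.List.foldl_append_if]
  simp

lemma pvMem_altNbrs (rows cols : Int) (c q : Int × Int) :
    q ∈ pvAltNbrs rows cols c ↔
      (∃ d ∈ pvOffs, q = (c.1 + d.1, c.2 + d.2)) ∧
        0 ≤ q.1 ∧ q.1 < rows ∧ 0 ≤ q.2 ∧ q.2 < cols := by
  rw [pvAltNbrs_eq]
  simp only [List.mem_map, List.mem_filter, decide_eq_true_eq]
  constructor
  · rintro ⟨d, ⟨hd, hb⟩, rfl⟩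
    exact ⟨⟨d, hd, rfl⟩, hb⟩
  · rintro ⟨⟨d, hd, rfl⟩, hb⟩
    exact ⟨d, ⟨hd, hb⟩, rfl⟩

lemma pvNodup_altNbrs (rows cols : Int) (c : Int × Int) :
    (pvAltNbrs rows cols c).Nodup := by
  rw [pvAltNbrs_eq]
  apply List.Nodup.map_on
  · intro x hx y hy h
    have h1 := congrArg Prod.fst h
    have h2 := congrArg Prod.snd h
    simp at h1 h2
    exact Prod.ext (by omega) (by omega)
  · exact List.Nodup.filter _ (by decide)

lemma pvAdj_iff (c q : Int × Int) :
    (∃ d ∈ pvOffs, q = (c.1 + d.1, c.2 + d.2)) ↔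
      (¬(q.1 = c.1 ∧ q.2 = c.2) ∧ c.1 - 1 ≤ q.1 ∧ q.1 ≤ c.1 + 1 ∧ c.2 - 1 ≤ q.2 ∧ q.2 ≤ c.2 + 1) := by
  simp only [pvOffs, List.mem_cons, List.not_mem_nil, or_false, Prod.ext_iff]
  constructor
  · rintro ⟨d, hd, h1, h2⟩
    rcases hd with h|h|h|h|h|h|h|h <;> omega
  · rintro h
    by_cases h1 : q.1 = c.1 - 1 <;> by_cases h2 : q.1 = c.1 <;> by_cases h3 : q.2 = c.2 - 1 <;>
      by_cases h4 : q.2 = c.2 <;>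
      first
      | exact ⟨(-1, -1), by norm_num, by omega, by omega⟩
      | exact ⟨(-1, 0), by norm_num, by omega, by omega⟩
      | exact ⟨(-1, 1), by norm_num, by omega, by omega⟩
      | exact ⟨(0, -1), by norm_num, by omega, by omega⟩
      | exact ⟨(0, 1), by norm_num, by omega, by omega⟩
      | exact ⟨(1, -1), by norm_num, by omega, by omega⟩
      | exact ⟨(1, 0), by norm_num, by omega, by omega⟩
      | exact ⟨(1, 1), by norm_num, by omega, by omega⟩

lemma pvAdj_symm (c q : Int × Int) :
    (∃ d ∈ pvOffs, q = (c.1 + d.1, c.2 + d.2)) ↔ (∃ d ∈ pvOffs, c = (q.1 + d.1, q.2 + d.2)) := by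
  rw [pvAdj_iff, pvAdj_iff]
  omega
lemma pvRect_row {R C : Nat} {g : List (List Bool)} (hR : pvRect R C g) {a : Nat} (ha : a < R) :
    (g.getD a []).length = C := by
  have h1 : a < g.length := hR.1 ▸ ha
  rw [List.getD_eq_getElem?_getD, List.getElem?_eq_getElem h1]
  exact hR.2 _ (List.getElem_mem h1)

lemma pvTerm_iff {R C : Nat} {g : List (List Bool)} {live : List (Int × Int)}
    (hR : pvRect R C g) (hinv : pvLiveInv R C g live) {a b : Nat} (ha : a < R) (hb : b < C)
    (di dj : Int) (hne : ¬(di = 0 ∧ dj = 0)) :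
    ((di ≠ 0 ∨ dj ≠ 0) ∧ 0 ≤ (a : Int) + di ∧ 0 ≤ (b : Int) + dj
      ∧ (a : Int) + di < (g.length : Int)
      ∧ (b : Int) + dj < ((PySem.List.pyGetD g (a : Int) []).length : Int)
      ∧ PySem.List.pyGetD (PySem.List.pyGetD g ((a : Int) + di) []) ((b : Int) + dj) false = true)
    ↔ (((a : Int) + di, (b : Int) + dj) ∈ live) := by
  rw [PySem.List.pyGetD_natCast, pvRect_row hR ha]
  have hgR : ((g.length : Int)) = ((R : Int)) := by rw [hR.1]
  rw [hgR]
  constructor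
  · rintro ⟨-, h1, h2, h3, h4, h5⟩
    have ea : (a : Int) + di = ((((a : Int) + di).toNat : Nat) : Int) := by omega
    have eb : (b : Int) + dj = ((((b : Int) + dj).toNat : Nat) : Int) := by omega
    rw [ea, eb] at h5 ⊢
    rw [PySem.List.pyGetD_natCast, PySem.List.pyGetD_natCast] at h5
    exact (hinv.2 _).mpr ⟨_, _, by omega, by omega, rfl, h5⟩
  · intro hmem
    obtain ⟨a', b', ha', hb', heq, hc⟩ := (hinv.2 _).mp hmem
    have e1 : (a : Int) + di = (a' : Int) := congrArg Prod.fst heq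
    have e2 : (b : Int) + dj = (b' : Int) := congrArg Prod.snd heq
    rw [e1, e2, PySem.List.pyGetD_natCast, PySem.List.pyGetD_natCast]
    exact ⟨by omega, by omega, by omega, by omega, by omega, hc⟩

lemma pvNbr_count {R C : Nat} {g : List (List Bool)} {live : List (Int × Int)}
    (hR : pvRect R C g) (hinv : pvLiveInv R C g live) {a b : Nat} (ha : a < R) (hb : b < C) :
    pvNbr g (a : Int) (b : Int) =
      ((pvOffs.countP (fun d => decide (((a : Int) + d.1, (b : Int) + d.2) ∈ live))) : Int) := by
  have hry : PySem.List.pyRange (-1) 2 1 = [-1, 0, 1] := by decide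
  have key : ∀ (P : Prop) [Decidable P] (c : Int), (if P then c + 1 else c) = c + (if P then 1 else 0) := by
    intros P _ c; split <;> simp
  unfold pvNbr
  rw [hry]
  simp only [List.foldl_cons, List.foldl_nil, key]
  have t := fun di dj hne => pvTerm_iff hR hinv ha hb di dj hne
  rw [if_congr (t (-1) (-1) (by omega)) rfl rfl, if_congr (t (-1) 0 (by omega)) rfl rfl,
      if_congr (t (-1) 1 (by omega)) rfl rfl, if_congr (t 0 (-1) (by omega)) rfl rfl,
      if_congr (t 0 1 (by omega)) rfl rfl, if_congr (t 1 (-1) (by omega)) rfl rfl,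
      if_congr (t 1 0 (by omega)) rfl rfl, if_congr (t 1 1 (by omega)) rfl rfl]
  have z : (if ((0:Int) ≠ 0 ∨ (0:Int) ≠ 0) ∧ 0 ≤ (a : Int) + 0 ∧ 0 ≤ (b : Int) + 0
      ∧ (a : Int) + 0 < (g.length : Int)
      ∧ (b : Int) + 0 < ((PySem.List.pyGetD g (a : Int) []).length : Int)
      ∧ PySem.List.pyGetD (PySem.List.pyGetD g ((a : Int) + 0) []) ((b : Int) + 0) false = true
      then (1:Int) else 0) = 0 := by
    rw [if_neg]; rintro ⟨h, -⟩; omega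
  rw [z]
  simp only [pvOffs, List.countP_cons, List.countP_nil, decide_eq_true_eq]
  push_cast
  ring
lemma pvCountFlatMap (l : List (Int × Int)) (f : (Int × Int) → List (Int × Int)) (p : Int × Int) :
    (l.flatMap f).count p = (l.map (fun c => (f c).count p)).sum := by
  induction l with
  | nil => simp
  | cons a t ih => simp [List.count_append, ih]

lemma pvSumIndicator (l : List (Int × Int)) (q : (Int × Int) → Bool) :
    (l.map (fun c => if q c then 1 else 0)).sum = l.countP q := by
  induction l with
  | nil => simp
  | cons a t ih =>
    rw [List.map_cons, List.sum_cons, ih, List.countP_cons]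
    by_cases h : q a <;> simp [h] <;> omega

lemma pvFilterMemComm (l1 l2 : List (Int × Int)) (h1 : l1.Nodup) (h2 : l2.Nodup) :
    (l1.filter (fun x => decide (x ∈ l2))).length = (l2.filter (fun x => decide (x ∈ l1))).length := by
  rw [← List.toFinset_card_of_nodup (h1.filter _), ← List.toFinset_card_of_nodup (h2.filter _)]
  congr 1
  ext x
  simp [And.comm]

lemma pvGetD_mapRange {α : Type} (n : Nat) (f : Nat → α) (a : Nat) (ha : a < n) (d : α) :
    ((List.range n).map f).getD a d = f a := by
  rw [List.getD_eq_getElem?_getD, List.getElem?_map, List.getElem?_range ha]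
  rfl

lemma pvRect_step {R C : Nat} {g : List (List Bool)} (hR : pvRect R C g) :
    pvRect R C (pvStepGrid g) := by
  rw [pvStep_shape]
  constructor
  · simp [hR.1]
  · intro r hr
    obtain ⟨a, hmem, rfl⟩ := List.mem_map.mp hr
    rw [List.mem_range, hR.1] at hmem
    rw [List.length_map, List.length_range]
    exact pvRect_row hR hmem

lemma pvCell_step {R C : Nat} {g : List (List Bool)} (hR : pvRect R C g)
    {a b : Nat} (ha : a < R) (hb : b < C) :
    pvCell (pvStepGrid g) a b =
      (if pvCell g a b then decide (2 ≤ pvNbr g ↑a ↑b ∧ pvNbr g ↑a ↑b ≤ 3)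
       else decide (pvNbr g ↑a ↑b = 3)) := by
  rw [pvStep_shape]
  unfold pvCell
  rw [pvGetD_mapRange _ _ _ (hR.1 ▸ ha), pvGetD_mapRange _ _ _ (by rw [pvRect_row hR ha]; exact hb)]

lemma pvMemLive_iff {R C : Nat} {g : List (List Bool)} {live : List (Int × Int)}
    (hinv : pvLiveInv R C g live) {a b : Nat} (ha : a < R) (hb : b < C) :
    (((a : Int), (b : Int)) ∈ live) ↔ pvCell g a b = true := by
  rw [hinv.2]
  constructor
  · rintro ⟨a', b', ha', hb', heq, hc⟩
    have e1 : (a : Int) = (a' : Int) := congrArg Prod.fst heq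
    have e2 : (b : Int) = (b' : Int) := congrArg Prod.snd heq
    have : a = a' := by omega
    have : b = b' := by omega
    subst_vars
    exact hc
  · intro hc
    exact ⟨a, b, ha, hb, rfl, hc⟩

lemma pvKeysCount {R C : Nat} {g : List (List Bool)} {live : List (Int × Int)}
    (hinv : pvLiveInv R C g live) (p : Int × Int)
    (hp : 0 ≤ p.1 ∧ p.1 < (R : Int) ∧ 0 ≤ p.2 ∧ p.2 < (C : Int)) :
    (live.flatMap (pvAltNbrs (R : Int) (C : Int))).count p =
      pvOffs.countP (fun d => decide ((p.1 + d.1, p.2 + d.2) ∈ live)) := by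
  have hbnd : ∀ c ∈ live, 0 ≤ c.1 ∧ c.1 < (R : Int) ∧ 0 ≤ c.2 ∧ c.2 < (C : Int) := by
    intro c hc
    obtain ⟨a', b', ha', hb', rfl, -⟩ := (hinv.2 _).mp hc
    refine ⟨by omega, by omega, by omega, by omega⟩
  rw [pvCountFlatMap]
  have e1 : live.map (fun c => (pvAltNbrs (R : Int) (C : Int) c).count p) =
      live.map (fun c => if decide (p ∈ pvAltNbrs (R : Int) (C : Int) c) then 1 else 0) := by
    refine List.map_congr_left fun c _ => ?_
    by_cases h : p ∈ pvAltNbrs (R : Int) (C : Int) c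
    · simp [h, List.count_eq_one_of_mem (pvNodup_altNbrs _ _ _) h]
    · simp [h, List.count_eq_zero.mpr h]
  rw [e1, pvSumIndicator]
  have e2 : live.countP (fun c => decide (p ∈ pvAltNbrs (R : Int) (C : Int) c)) =
      live.countP (fun c => decide (c ∈ pvAltNbrs (R : Int) (C : Int) p)) := by
    refine List.countP_congr fun c hc => ?_
    simp only [decide_eq_true_eq]
    rw [pvMem_altNbrs, pvMem_altNbrs, pvAdj_symm]
    have hcb := hbnd c hc
    constructor
    · rintro ⟨hadj, -⟩; exact ⟨hadj, hcb⟩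
    · rintro ⟨hadj, -⟩; exact ⟨hadj, hp⟩
  rw [e2, List.countP_eq_length_filter, pvFilterMemComm _ _ hinv.1 (pvNodup_altNbrs _ _ _),
    ← List.countP_eq_length_filter]
  rw [pvAltNbrs_eq, List.countP_map, List.countP_filter]
  refine List.countP_congr fun d _ => ?_
  simp only [Function.comp, decide_eq_true_eq, Bool.and_eq_true]
  constructor
  · rintro ⟨hm, -⟩; exact hm
  · intro hm; exact ⟨hm, by simpa using hbnd _ hm⟩
lemma pvMem_altStep {R C : Nat} {g : List (List Bool)} {live : List (Int × Int)}
    (hR : pvRect R C g) (hinv : pvLiveInv R C g live)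
    (corners : PySem.Set (Int × Int)) (p : Int × Int) :
    p ∈ pvAltStep (R : Int) (C : Int) corners live ↔
      p ∈ corners ∨ ∃ a b : Nat, a < R ∧ b < C ∧ p = ((a : Int), (b : Int)) ∧
        pvCell (pvStepGrid g) a b = true := by
  unfold pvAltStep
  dsimp only
  rw [PySem.List.foldl_append_eq_flatMap, List.nil_append]
  have ec := PySem.Dict.foldl_insert_getD_add_one_eq_counter
    (List.flatMap (pvAltNbrs (R : Int) (C : Int)) live)
  rw [ec, PySem.Set.mem_union, PySem.Dict.items_counter, PySem.Set.mem_ofList]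
  set keys := live.flatMap (pvAltNbrs (R : Int) (C : Int)) with hkeys
  have hcount : ∀ a b : Nat, a < R → b < C →
      keys.count ((a : Int), (b : Int)) =
        pvOffs.countP (fun d => decide (((a : Int) + d.1, (b : Int) + d.2) ∈ live)) := by
    intro a b ha hb
    rw [hkeys]
    have := pvKeysCount hinv ((a : Int), (b : Int)) (by refine ⟨by omega, by omega, by omega, by omega⟩)
    simpa using this
  have hmain : (p ∈ (((PySem.Set.ofList keys).map (fun k => (k, (keys.count k : Int)))).filter
        (fun q => q.2 == 3 || (q.2 == 2 && PySem.Set.contains live q.1))).map (·.1)) ↔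
      ∃ a b : Nat, a < R ∧ b < C ∧ p = ((a : Int), (b : Int)) ∧
        pvCell (pvStepGrid g) a b = true := by
    simp only [List.mem_map, List.mem_filter, PySem.Set.mem_ofList]
    constructor
    · rintro ⟨q, ⟨⟨k, hk, rfl⟩, hcond⟩, rfl⟩
      simp only at hcond ⊢
      obtain ⟨c, hc, hpn⟩ := List.mem_flatMap.mp hk
      have hpb := (pvMem_altNbrs _ _ _ _).mp hpn
      obtain ⟨a, b, ha, hb, rfl⟩ : ∃ a b : Nat, a < R ∧ b < C ∧ k = ((a : Int), (b : Int)) := by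
        refine ⟨k.1.toNat, k.2.toNat, by omega, by omega, ?_⟩
        obtain ⟨x, y⟩ := k
        simp only [Prod.ext_iff]
        constructor <;> simp <;> omega
      refine ⟨a, b, ha, hb, rfl, ?_⟩
      rw [pvCell_step hR ha hb]
      have hn := hcount a b ha hb
      have hnbr := pvNbr_count hR hinv ha hb
      simp only [Bool.or_eq_true, Bool.and_eq_true, beq_iff_eq] at hcond
      by_cases hcell : pvCell g a b = true
      · rw [if_pos hcell]
        simp only [decide_eq_true_eq]
        rw [hnbr]
        rcases hcond with h3 | ⟨h2, -⟩
        · rw [hn] at h3; omega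
        · rw [hn] at h2; omega
      · rw [if_neg hcell]
        simp only [decide_eq_true_eq]
        rw [hnbr]
        rcases hcond with h3 | ⟨-, hlv⟩
        · rw [hn] at h3; omega
        · exact absurd ((pvMemLive_iff hinv ha hb).mp ((PySem.Set.contains_iff _ _).mp hlv)) hcell
    · rintro ⟨a, b, ha, hb, rfl, hstep⟩
      have hn := hcount a b ha hb
      have hnbr := pvNbr_count hR hinv ha hb
      rw [pvCell_step hR ha hb] at hstep
      have hm : (keys.count ((a : Int), (b : Int)) = 3) ∨
          (keys.count ((a : Int), (b : Int)) = 2 ∧ pvCell g a b = true) := by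
        by_cases hcell : pvCell g a b = true
        · rw [if_pos hcell] at hstep
          simp only [decide_eq_true_eq] at hstep
          rw [hnbr] at hstep
          rw [hn]
          have h23 : pvOffs.countP (fun d => decide (((a : Int) + d.1, (b : Int) + d.2) ∈ live)) = 3 ∨
              pvOffs.countP (fun d => decide (((a : Int) + d.1, (b : Int) + d.2) ∈ live)) = 2 := by
            omega
          rcases h23 with h | h
          · exact Or.inl h
          · exact Or.inr ⟨h, hcell⟩
        · rw [if_neg hcell] at hstep
          simp only [decide_eq_true_eq] at hstep
          rw [hnbr] at hstep
          rw [hn]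
          exact Or.inl (by omega)
      have hpos : 0 < keys.count ((a : Int), (b : Int)) := by omega
      have hmem : ((a : Int), (b : Int)) ∈ keys := List.count_pos_iff.mp hpos
      refine ⟨(((a : Int), (b : Int)), (keys.count ((a : Int), (b : Int)) : Int)),
        ⟨⟨((a : Int), (b : Int)), hmem, rfl⟩, ?_⟩, rfl⟩
      simp only [Bool.or_eq_true, Bool.and_eq_true, beq_iff_eq]
      rcases hm with h3 | ⟨h2, hcell⟩
      · left; rw [h3]; rfl
      · right
        exact ⟨by rw [h2]; rfl, (PySem.Set.contains_iff _ _).mpr ((pvMemLive_iff hinv ha hb).mpr hcell)⟩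
  rw [hmain]
  exact or_comm
lemma pvRect_setCell {R C : Nat} {h : List (List Bool)} (hR : pvRect R C h)
    {a : Nat} (ha : a < R) (b : Nat) : pvRect R C (pvSetCell h a b) := by
  unfold pvSetCell
  constructor
  · rw [List.length_set]; exact hR.1
  · intro r hr
    rcases List.mem_or_eq_of_mem_set hr with hmem | rfl
    · exact hR.2 r hmem
    · rw [List.length_set]; exact pvRect_row hR ha

lemma pvCell_setCell {R C : Nat} {h : List (List Bool)} (hR : pvRect R C h)
    {a b x y : Nat} (ha : a < R) (hb : b < C) (hx : x < R) (hy : y < C) :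
    pvCell (pvSetCell h a b) x y = if x = a ∧ y = b then true else pvCell h x y := by
  unfold pvSetCell pvCell
  rw [pvGetD_set]
  by_cases hxa : x = a
  · subst hxa
    rw [if_pos ⟨rfl, hR.1 ▸ hx⟩, pvGetD_setB]
    have hlen : (h.getD x []).length = C := pvRect_row hR hx
    by_cases hyb : y = b
    · subst hyb; rw [if_pos ⟨rfl, hlen ▸ hb⟩, if_pos ⟨rfl, rfl⟩]
    · rw [if_neg (fun hc => hyb hc.1), if_neg (fun hc => hyb hc.2)]
  · rw [if_neg (fun hc => hxa hc.1), if_neg (fun hc => hxa hc.1)]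

lemma pvRect_iterA {R C : Nat} {g : List (List Bool)} (hR : pvRect R C g)
    (hR1 : 1 ≤ R) (hC1 : 1 ≤ C) : pvRect R C (pvIterA g) := by
  unfold pvIterA
  dsimp only
  have h1 := pvRect_step hR
  have h2 := pvRect_setCell h1 (a := 0) (by omega) 0
  have e2 : (PySem.List.pyGetD (pvSetCell (pvStepGrid g) 0 0) 0 []).length - 1 = C - 1 := by
    rw [PySem.List.pyGetD_ofNat', pvRect_row h2 (by omega : 0 < R)]
  rw [e2]
  have h3 := pvRect_setCell h2 (a := 0) (by omega) (C - 1)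
  have e3 : (pvSetCell (pvSetCell (pvStepGrid g) 0 0) 0 (C - 1)).length - 1 = R - 1 := by
    rw [h3.1]
  rw [e3]
  have h4 := pvRect_setCell h3 (a := R - 1) (by omega) 0
  have e4 : (pvSetCell (pvSetCell (pvSetCell (pvStepGrid g) 0 0) 0 (C - 1)) (R - 1) 0).length - 1 = R - 1 := by
    rw [h4.1]
  have e5 : (PySem.List.pyGetD (pvSetCell (pvSetCell (pvSetCell (pvStepGrid g) 0 0) 0 (C - 1)) (R - 1) 0) 0 []).length - 1 = C - 1 := by
    rw [PySem.List.pyGetD_ofNat', pvRect_row h4 (by omega : 0 < R)]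
  rw [e4, e5]
  exact pvRect_setCell h4 (a := R - 1) (by omega) (C - 1)

lemma pvCell_iterA {R C : Nat} {g : List (List Bool)} (hR : pvRect R C g)
    (hR1 : 1 ≤ R) (hC1 : 1 ≤ C) {x y : Nat} (hx : x < R) (hy : y < C) :
    pvCell (pvIterA g) x y =
      if (x = 0 ∧ y = 0) ∨ (x = 0 ∧ y = C - 1) ∨ (x = R - 1 ∧ y = 0) ∨ (x = R - 1 ∧ y = C - 1)
      then true else pvCell (pvStepGrid g) x y := by
  unfold pvIterA
  dsimp only
  have h1 := pvRect_step hR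
  have h2 := pvRect_setCell h1 (a := 0) (by omega) 0
  have e2 : (PySem.List.pyGetD (pvSetCell (pvStepGrid g) 0 0) 0 []).length - 1 = C - 1 := by
    rw [PySem.List.pyGetD_ofNat', pvRect_row h2 (by omega : 0 < R)]
  rw [e2]
  have h3 := pvRect_setCell h2 (a := 0) (by omega) (C - 1)
  have e3 : (pvSetCell (pvSetCell (pvStepGrid g) 0 0) 0 (C - 1)).length - 1 = R - 1 := by
    rw [h3.1]
  rw [e3]
  have h4 := pvRect_setCell h3 (a := R - 1) (by omega) 0
  have e4 : (pvSetCell (pvSetCell (pvSetCell (pvStepGrid g) 0 0) 0 (C - 1)) (R - 1) 0).length - 1 = R - 1 := by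
    rw [h4.1]
  have e5 : (PySem.List.pyGetD (pvSetCell (pvSetCell (pvSetCell (pvStepGrid g) 0 0) 0 (C - 1)) (R - 1) 0) 0 []).length - 1 = C - 1 := by
    rw [PySem.List.pyGetD_ofNat', pvRect_row h4 (by omega : 0 < R)]
  rw [e4, e5]
  rw [pvCell_setCell h4 (by omega) (by omega) hx hy,
      pvCell_setCell h3 (by omega) (by omega) hx hy,
      pvCell_setCell h2 (by omega) (by omega) hx hy,
      pvCell_setCell h1 (by omega) (by omega) hx hy]
  by_cases c1 : x = 0 ∧ y = 0 <;> by_cases c2 : x = 0 ∧ y = C - 1 <;>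
    by_cases c3 : x = R - 1 ∧ y = 0 <;> by_cases c4 : x = R - 1 ∧ y = C - 1 <;>
    simp [c1, c2, c3, c4]

lemma pvMem_cornersB {R C : Nat} (hR1 : 1 ≤ R) (hC1 : 1 ≤ C) (p : Int × Int) :
    p ∈ pvAltCorners (R : Int) (C : Int) ↔ ∃ a b : Nat, a < R ∧ b < C ∧ p = ((a : Int), (b : Int)) ∧
      ((a = 0 ∧ b = 0) ∨ (a = 0 ∧ b = C - 1) ∨ (a = R - 1 ∧ b = 0) ∨ (a = R - 1 ∧ b = C - 1)) := by
  unfold pvAltCorners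
  rw [PySem.Set.mem_ofList]
  simp only [List.mem_cons, List.not_mem_nil, or_false]
  constructor
  · rintro (rfl | rfl | rfl | rfl)
    · exact ⟨0, 0, by omega, by omega, by simp, by omega⟩
    · exact ⟨0, C - 1, by omega, by omega, by simp; omega, by omega⟩
    · exact ⟨R - 1, 0, by omega, by omega, by simp; omega, by omega⟩
    · exact ⟨R - 1, C - 1, by omega, by omega, by simp; omega, by omega⟩
  · rintro ⟨a, b, ha, hb, rfl, hc⟩
    rcases hc with ⟨rfl, rfl⟩ | ⟨rfl, rfl⟩ | ⟨rfl, rfl⟩ | ⟨rfl, rfl⟩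
    · left; simp
    · right; left; simp; omega
    · right; right; left; simp; omega
    · right; right; right; simp; omega

lemma pvInv_iterA {R C : Nat} {g : List (List Bool)} {live : List (Int × Int)}
    (hR1 : 1 ≤ R) (hC1 : 1 ≤ C) (hR : pvRect R C g) (hinv : pvLiveInv R C g live) :
    pvLiveInv R C (pvIterA g) (pvAltStep (R : Int) (C : Int) (pvAltCorners (R : Int) (C : Int)) live) := by
  constructor
  · exact PySem.Set.nodup_union _ _ (PySem.Set.nodup_ofList _)
  · intro p
    rw [pvMem_altStep hR hinv, pvMem_cornersB hR1 hC1]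
    constructor
    · rintro (⟨a, b, ha, hb, rfl, hcorn⟩ | ⟨a, b, ha, hb, rfl, hstep⟩)
      · refine ⟨a, b, ha, hb, rfl, ?_⟩
        rw [pvCell_iterA hR hR1 hC1 ha hb, if_pos hcorn]
      · refine ⟨a, b, ha, hb, rfl, ?_⟩
        rw [pvCell_iterA hR hR1 hC1 ha hb]
        by_cases hcorn : (a = 0 ∧ b = 0) ∨ (a = 0 ∧ b = C - 1) ∨ (a = R - 1 ∧ b = 0) ∨ (a = R - 1 ∧ b = C - 1)
        · rw [if_pos hcorn]
        · rw [if_neg hcorn]; exact hstep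
    · rintro ⟨a, b, ha, hb, rfl, hcell⟩
      rw [pvCell_iterA hR hR1 hC1 ha hb] at hcell
      by_cases hcorn : (a = 0 ∧ b = 0) ∨ (a = 0 ∧ b = C - 1) ∨ (a = R - 1 ∧ b = 0) ∨ (a = R - 1 ∧ b = C - 1)
      · exact Or.inl ⟨a, b, ha, hb, rfl, hcorn⟩
      · rw [if_neg hcorn] at hcell
        exact Or.inr ⟨a, b, ha, hb, rfl, hcell⟩
lemma pvGetD_map {α β : Type} (l : List α) (f : α → β) (a : Nat) (h : a < l.length) (d : β) :
    (l.map f).getD a d = f l[a] := by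
  rw [List.getD_eq_getElem?_getD, List.getElem?_map, List.getElem?_eq_getElem h]
  rfl

lemma pvInit (lines : List String) (C : Nat)
    (hlen : ∀ s ∈ lines, s.toList.length = C) :
    pvRect lines.length C (pvParseLines lines) ∧
    pvLiveInv lines.length C (pvParseLines lines)
      (PySem.Set.ofList ((PySem.List.enumerate lines 0).flatMap (fun p =>
        (((PySem.List.enumerate p.2.toList 0).filter (fun q => q.2 == '#')).map
          (fun q => (p.1, q.1)))))) := by
  have hrect : pvRect lines.length C (pvParseLines lines) := by
    rw [pvParse_eq]
    refine ⟨by simp, ?_⟩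
    intro r hr
    obtain ⟨l, hl, rfl⟩ := List.mem_map.mp hr
    simp [hlen l hl]
  refine ⟨hrect, PySem.Set.nodup_ofList _, fun p => ?_⟩
  rw [PySem.Set.mem_ofList, List.mem_flatMap]
  constructor
  · rintro ⟨q, hq, hp⟩
    obtain ⟨k, hk, rfl⟩ := (PySem.List.mem_enumerate_iff _ _ _).mp hq
    obtain ⟨r, hr, rfl⟩ := List.mem_map.mp hp
    obtain ⟨hre, hrc⟩ := List.mem_filter.mp hr
    obtain ⟨m, hm, rfl⟩ := (PySem.List.mem_enumerate_iff _ _ _).mp hre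
    refine ⟨k, m, hk, by rw [← hlen lines[k] (lines.getElem_mem hk)]; exact hm, by simp, ?_⟩
    unfold pvCell
    rw [pvParse_eq, pvGetD_map _ _ _ (by simpa using hk),
      pvGetD_map _ _ _ (by simpa using hm)]
    simpa using hrc
  · rintro ⟨a, b, ha, hb, rfl, hc⟩
    unfold pvCell at hc
    rw [pvParse_eq, pvGetD_map _ _ _ (by simpa using ha)] at hc
    have hb' : b < lines[a].toList.length := by rw [hlen lines[a] (lines.getElem_mem ha)]; exact hb
    rw [pvGetD_map _ _ _ (by simpa using hb')] at hc
    refine ⟨((a : Int), lines[a]), ?_, ?_⟩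
    · rw [PySem.List.mem_enumerate_iff]
      exact ⟨a, ha, by simp⟩
    · refine List.mem_map.mpr ⟨((b : Int), lines[a].toList[b]), ?_, rfl⟩
      refine List.mem_filter.mpr ⟨?_, by simpa using hc⟩
      rw [PySem.List.mem_enumerate_iff]
      exact ⟨b, hb', by simp⟩

lemma pvFoldInv (n : Nat) {R C : Nat} {g0 : List (List Bool)} {s0 : List (Int × Int)}
    (hR1 : 1 ≤ R) (hC1 : 1 ≤ C) (hR0 : pvRect R C g0) (hinv0 : pvLiveInv R C g0 s0) :
    pvRect R C ((List.range n).foldl (fun g _ => pvIterA g) g0) ∧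
    pvLiveInv R C ((List.range n).foldl (fun g _ => pvIterA g) g0)
      ((List.range n).foldl (fun s _ => pvAltStep (R : Int) (C : Int) (pvAltCorners (R : Int) (C : Int)) s) s0) := by
  induction n with
  | zero => exact ⟨hR0, hinv0⟩
  | succ m ih =>
    rw [List.range_succ, List.foldl_append, List.foldl_append]
    simp only [List.foldl_cons, List.foldl_nil]
    exact ⟨pvRect_iterA ih.1 hR1 hC1, pvInv_iterA hR1 hC1 ih.1 ih.2⟩

lemma pvSumCast (l : List (List Bool)) (f : List Bool → Nat) :
    ((l.map (fun r => (f r : Int))).sum) = (((l.map f).sum : Nat) : Int) := by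
  induction l with
  | nil => simp
  | cons a t ih => simp [ih]

lemma pvLightCount_eq (g : List (List Bool)) :
    pvLightCount g = (((g.map (fun r => r.countP (fun x => x))).sum : Nat) : Int) := by
  unfold pvLightCount
  rw [PySem.List.foldl_pyRange_zero_pyGetD' g []
    (fun c row => (PySem.List.pyRange 0 (row.length : Int) 1).foldl
      (fun c j => if PySem.List.pyGetD row j false then c + 1 else c) c) 0]
  have e : ∀ (c : Int) (row : List Bool),
      (PySem.List.pyRange 0 (row.length : Int) 1).foldl
        (fun c j => if PySem.List.pyGetD row j false then c + 1 else c) c =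
      c + ((row.countP (fun x => x) : Nat) : Int) := by
    intro c row
    rw [PySem.List.foldl_pyRange_zero_pyGetD' row false
      (fun c x => if x then c + 1 else c) c]
    rw [PySem.List.foldl_count_if (fun x => x) row c]
  have e2 : g.foldl (fun c row => (PySem.List.pyRange 0 (row.length : Int) 1).foldl
        (fun c j => if PySem.List.pyGetD row j false then c + 1 else c) c) 0 =
      g.foldl (fun c row => c + ((row.countP (fun x => x) : Nat) : Int)) 0 := by
    congr 1
    funext c row
    exact e c row
  rw [e2, PySem.List.foldl_add g (fun row => ((row.countP (fun x => x) : Nat) : Int)) 0,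
    pvSumCast]
  simp

def pvCanon (R C : Nat) (g : List (List Bool)) : List (Int × Int) :=
  ((((List.range R) ×ˢ (List.range C))).filter (fun q => pvCell g q.1 q.2)).map
    (fun q => ((q.1 : Int), (q.2 : Int)))

lemma pvCanon_nodup (R C : Nat) (g : List (List Bool)) : (pvCanon R C g).Nodup := by
  unfold pvCanon
  refine List.Nodup.map_on ?_
    (List.Nodup.filter _ (List.Nodup.product List.nodup_range List.nodup_range))
  intro x _ y _ hxy
  have h1 := congrArg Prod.fst hxy
  have h2 := congrArg Prod.snd hxy
  simp at h1 h2
  exact Prod.ext h1 h2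

lemma pvCanon_mem (R C : Nat) (g : List (List Bool)) (p : Int × Int) :
    p ∈ pvCanon R C g ↔
      ∃ a b : Nat, a < R ∧ b < C ∧ p = ((a : Int), (b : Int)) ∧ pvCell g a b = true := by
  unfold pvCanon
  simp only [List.mem_map, List.mem_filter]
  constructor
  · rintro ⟨⟨a, b⟩, ⟨hprod, hc⟩, rfl⟩
    obtain ⟨ha, hb⟩ := List.pair_mem_product.mp hprod
    rw [List.mem_range] at ha hb
    exact ⟨a, b, ha, hb, rfl, hc⟩
  · rintro ⟨a, b, ha, hb, rfl, hc⟩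
    exact ⟨(a, b), ⟨List.pair_mem_product.mpr ⟨List.mem_range.mpr ha, List.mem_range.mpr hb⟩, hc⟩, rfl⟩

lemma pvLenFilterProduct (l1 l2 : List Nat) (p : Nat → Nat → Bool) :
    ((l1 ×ˢ l2).filter (fun q => p q.1 q.2)).length =
      (l1.map (fun a => (l2.filter (p a)).length)).sum := by
  induction l1 with
  | nil => simp
  | cons a t ih =>
    rw [List.product_cons, List.filter_append, List.length_append, ih, List.filter_map]
    simp [Function.comp_def]

lemma pvMapAsRange (g : List (List Bool)) (h : List Bool → Nat) :
    g.map h = (List.range g.length).map (fun a => h (g.getD a [])) := by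
  conv_lhs => rw [← pvMapRangeGetD g []]
  rw [List.map_map]
  rfl

lemma pvCanon_len {R C : Nat} {g : List (List Bool)} (hR : pvRect R C g) :
    (pvCanon R C g).length = (g.map (fun r => r.countP (fun x => x))).sum := by
  unfold pvCanon
  rw [List.length_map, pvLenFilterProduct, pvMapAsRange g (fun r => r.countP (fun x => x)), hR.1]
  congr 1
  refine List.map_congr_left fun a hmem => ?_
  rw [List.mem_range] at hmem
  have hrow : (g.getD a []).length = C := pvRect_row hR hmem
  rw [← List.countP_eq_length_filter]
  conv_rhs => rw [← pvMapRangeGetD (g.getD a []) false]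
  rw [List.countP_map, hrow]
  rfl

lemma pvCount_final {R C : Nat} {g : List (List Bool)} {live : List (Int × Int)}
    (hR : pvRect R C g) (hinv : pvLiveInv R C g live) :
    pvLightCount g = (live.length : Int) := by
  have hperm : live.Perm (pvCanon R C g) := by
    rw [List.perm_ext_iff_of_nodup hinv.1 (pvCanon_nodup R C g)]
    intro p
    rw [pvCanon_mem, hinv.2]
  rw [pvLightCount_eq, hperm.length_eq, pvCanon_len hR]
lemma pvWidths_const (lines : List String) (C : Nat) (hne : lines ≠ [])
    (hlen : ∀ s ∈ lines, s.toList.length = C) :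
    PySem.Set.ofList (lines.map (fun l => (l.toList.length : Int))) = [(C : Int)] := by
  induction lines with
  | nil => exact absurd rfl hne
  | cons a t ih =>
    rw [List.map_cons, PySem.Set.ofList_cons]
    have ha : (a.toList.length : Int) = (C : Int) := by rw [hlen a List.mem_cons_self]
    rw [ha]
    have hd : PySem.Set.discard (PySem.Set.ofList (t.map (fun l => (l.toList.length : Int)))) (C : Int) = [] := by
      refine List.eq_nil_iff_forall_not_mem.mpr fun x hx => ?_
      obtain ⟨hx1, hx2⟩ := (PySem.Set.mem_discard _ _ _).mp hx
      obtain ⟨s, hs, rfl⟩ := List.mem_map.mp ((PySem.Set.mem_ofList _ _).mp hx1)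
      exact hx2 (by rw [hlen s (List.mem_cons_of_mem _ hs)])
    rw [hd]

-- ===== VERDICT (by name: the statement is the Claim_ definition above) =====
theorem part2_spec : Claim_equal_part2 := by
  unfold Claim_equal_part2
  intro lines _ hpre
  unfold Spec_part2 part2 part2_alt
  dsimp only
  obtain ⟨hne, hw, hlen⟩ := hpre
  have hR1 : 1 ≤ lines.length := by
    cases lines with
    | nil => exact absurd rfl hne
    | cons a t => simp
  rw [pvWidths_const lines ((PySem.List.pyGetD lines 0 "").toList.length) hne hlen]
  obtain ⟨hrect0, hinv0⟩ := pvInit lines ((PySem.List.pyGetD lines 0 "").toList.length) hlen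
  have hfold := pvFoldInv 100 hR1 hw hrect0 hinv0
  rw [show (if ([((PySem.List.pyGetD lines 0 "").toList.length : Int)] : List Int).length = 1
      then ([((PySem.List.pyGetD lines 0 "").toList.length : Int)] : List Int).getD 0 0 else 0)
      = ((PySem.List.pyGetD lines 0 "").toList.length : Int) from rfl]
  rw [pvCount_final hfold.1 hfold.2]
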